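-- pv_equiv track=rewrite | github.com/yoganurrahman/moolai-gym-api | app/utils/audit.py | sanitize_for_audit
-- ===== SOURCE A (Python) =====
-- from typing import Optional, Dict, Any
--
-- def sanitize_for_audit(data: Dict[str, Any], exclude_fields: list = None) -> Dict[str, Any]:
--     """
--     Sanitize data for audit logging (remove sensitive fields)
--
--     Args:
--         data: Data dictionary
--         exclude_fields: List of field names to exclude (e.g., passwords)
--
--     Returns:
--         Sanitized dictionary
--     """
--     if not data:
--         return {}
--
--     # Default sensitive fields to exclude
--     default_excludes = ['password', 'pin', 'token', 'secret', 'credential']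
--     exclude_fields = exclude_fields or []
--     all_excludes = default_excludes + exclude_fields
--
--     # Create copy and remove sensitive fields
--     sanitized = dict(data)
--     for field in all_excludes:
--         if field in sanitized:
--             sanitized[field] = "***REDACTED***"
--
--     return sanitized
-- ===== SOURCE B (Python) =====
-- def sanitize_for_audit(data, exclude_fields=None):
--     """Redact sensitive fields: one pass over the items with an output accumulator."""
--     excludes = set(['password', 'pin', 'token', 'secret', 'credential'] + list(exclude_fields or []))
--     out = []
--     for k, v in data.items():
--         out.append((k, '***REDACTED***' if k in excludes else v))
--     return dict(out)
-- ===== Notes on version B (the rewrite author's own statement) =====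
-- stated objective: alternative
-- what changed: A copies the dict and loops over the exclude list, mutating matching entries in the copy; B instead makes one accumulator pass over data's items, testing each key against a single exclude set, so the traversal target is flipped from the excludes to the data.
import Mathlib
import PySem

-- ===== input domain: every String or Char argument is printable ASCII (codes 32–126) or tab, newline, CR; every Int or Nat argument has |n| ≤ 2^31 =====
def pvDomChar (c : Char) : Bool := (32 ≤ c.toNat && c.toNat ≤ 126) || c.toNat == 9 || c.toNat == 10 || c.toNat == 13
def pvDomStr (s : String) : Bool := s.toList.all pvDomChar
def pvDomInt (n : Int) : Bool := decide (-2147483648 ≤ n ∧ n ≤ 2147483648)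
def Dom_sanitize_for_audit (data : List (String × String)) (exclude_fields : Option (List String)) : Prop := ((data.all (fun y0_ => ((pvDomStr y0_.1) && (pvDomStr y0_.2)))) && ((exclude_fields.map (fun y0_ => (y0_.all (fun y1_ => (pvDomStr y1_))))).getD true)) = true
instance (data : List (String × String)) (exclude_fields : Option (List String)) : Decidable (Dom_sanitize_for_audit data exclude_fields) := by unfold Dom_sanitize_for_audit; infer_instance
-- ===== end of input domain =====

-- B makes one pass over data's items with an output accumulator (membership-testing each key
-- against one combined exclude list) instead of A's dict copy mutated by a loop over the excludes.

-- ===== PORT A =====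
def sanitize_for_audit (data : List (String × String)) (exclude_fields : Option (List String)) : List (String × String) :=
  if data.isEmpty then []
  else
    let default_excludes := ["password", "pin", "token", "secret", "credential"]
    let excl := exclude_fields.getD []   -- `exclude_fields or []` (None and [] both yield [])
    let all_excludes := default_excludes ++ excl
    let sanitized := PySem.Dict.ofList data   -- dict(data)
    (all_excludes.foldl
      (fun d field => if d.contains field then d.insert field "***REDACTED***" else d)
      sanitized).items

-- ===== PORT B =====
def sanitize_for_audit_alt (data : List (String × String)) (exclude_fields : Option (List String)) : List (String × String) :=
  let excludes := PySem.Set.ofList (["password", "pin", "token", "secret", "credential"] ++ exclude_fields.getD [])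
  data.foldl
    (fun out p => out ++ [(p.1, if excludes.contains p.1 then "***REDACTED***" else p.2)])
    []
  -- `dict(out)` is the identity on the items when data's keys are distinct (Pre_)

-- ===== PRECONDITION & SPEC =====
-- The Python argument `data` is a dict, which cannot contain duplicate keys; Pre_ restricts the
-- association-list encoding to the lists that actually represent a Python dict.
def Pre_sanitize_for_audit (data : List (String × String)) (exclude_fields : Option (List String)) : Prop :=
  (data.map Prod.fst).Nodup

instance (data : List (String × String)) (exclude_fields : Option (List String)) : Decidable (Pre_sanitize_for_audit data exclude_fields) := by unfold Pre_sanitize_for_audit; infer_instance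

def pvWitness_sanitize_for_audit : (List (String × String)) × Option (List String) :=
  ([("user", "bob"), ("password", "hunter2"), ("note", " 7 ")], some ["note", "zz"])

def Spec_sanitize_for_audit (data : List (String × String)) (exclude_fields : Option (List String)) (out : List (String × String)) : Prop := out = sanitize_for_audit_alt data exclude_fields
instance (data : List (String × String)) (exclude_fields : Option (List String)) (out : List (String × String)) : Decidable (Spec_sanitize_for_audit data exclude_fields out) := by unfold Spec_sanitize_for_audit; infer_instance

-- ===== CLAIM (what is proved, stated in full; the proofs are below) =====
def Claim_equal_sanitize_for_audit : Prop := ∀ (data : List (String × String)) (exclude_fields : Option (List String)), Dom_sanitize_for_audit data exclude_fields → Pre_sanitize_for_audit data exclude_fields → Spec_sanitize_for_audit data exclude_fields (sanitize_for_audit data exclude_fields)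

-- ===== LEMMAS AND PROOFS =====

-- update by fresh, pairwise-distinct keys appends the pairs in order
theorem dict_update_items_of_nodup (ps : List (String × String)) (d : PySem.Dict String String)
    (h : (d.keys ++ ps.map Prod.fst).Nodup) : (d.update ps).items = d.items ++ ps := by
  induction ps generalizing d with
  | nil => simp [PySem.Dict.update]
  | cons p rest ih =>
    obtain ⟨k, v⟩ := p
    have hnc : d.contains k = false := by
      by_contra hc
      have hk : k ∈ d.keys := (PySem.Dict.contains_iff_mem_keys d k).1 (by
        cases hcc : d.contains k
        · exact absurd hcc hc
        · rfl)
      have := (List.nodup_append.mp h).2.2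
      exact this k hk k (by simp) rfl
    have hins : (d.insert k v).items = d.items ++ [(k, v)] :=
      PySem.Dict.items_insert_of_not_contains d v hnc
    have hkeys : (d.insert k v).keys = d.keys ++ [k] :=
      PySem.Dict.keys_insert_of_not_contains d v hnc
    have hstep : d.update ((k, v) :: rest) = (d.insert k v).update rest := by
      simp [PySem.Dict.update]
    rw [hstep, ih (d.insert k v) (by
      rw [hkeys]
      simpa [List.append_assoc] using h), hins]
    simp

theorem dict_ofList_items_of_nodup (data : List (String × String))
    (h : (data.map Prod.fst).Nodup) : (PySem.Dict.ofList data).items = data := by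
  have := dict_update_items_of_nodup data PySem.Dict.empty (by
    simpa [PySem.Dict.keys_empty] using h)
  simpa [PySem.Dict.ofList, PySem.Dict.empty] using this

-- A's redaction loop, characterised: it maps each item, redacting keys that occur in the exclude list
theorem redact_foldl_items (excl : List String) (d : PySem.Dict String String) :
    (excl.foldl
      (fun d field => if d.contains field then d.insert field "***REDACTED***" else d)
      d).items
    = d.items.map (fun p => if p.1 ∈ excl then (p.1, "***REDACTED***") else p) := by
  induction excl generalizing d with
  | nil => simp
  | cons f rest ih =>
    rw [List.foldl_cons, ih]
    by_cases hc : d.contains f = true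
    · rw [if_pos hc, PySem.Dict.items_insert_of_contains d _ hc, List.map_map]
      apply List.map_congr_left
      intro p _
      by_cases hpf : p.1 = f
      · subst hpf
        simp
      · simp [hpf, beq_iff_eq]
    · rw [if_neg hc]
      apply List.map_congr_left
      intro p hp
      have hpf : p.1 ≠ f := by
        intro hpf
        apply hc
        exact (PySem.Dict.contains_iff_mem_keys d f).2 (by
          rw [← hpf]
          exact List.mem_map_of_mem hp)
      simp [hpf]

-- set membership agrees with membership in the underlying list
theorem set_ofList_contains (l : List String) (k : String) :
    (PySem.Set.ofList l).contains k = decide (k ∈ l) := by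
  by_cases hm : k ∈ l
  · rw [decide_eq_true hm]
    exact (PySem.Set.contains_iff _ _).2 ((PySem.Set.mem_ofList _ _).2 hm)
  · rw [decide_eq_false hm]
    cases h : (PySem.Set.ofList l).contains k
    · rfl
    · exact absurd ((PySem.Set.mem_ofList _ _).1 ((PySem.Set.contains_iff _ _).1 h)) hm

-- B's accumulator pass, characterised the same way
theorem redact_pass_eq_map (excl : PySem.Set String) (xs : List (String × String)) (acc : List (String × String)) :
    xs.foldl (fun out p => out ++ [(p.1, if excl.contains p.1 then "***REDACTED***" else p.2)]) acc
    = acc ++ xs.map (fun p => if excl.contains p.1 then (p.1, "***REDACTED***") else p) := by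
  induction xs generalizing acc with
  | nil => simp
  | cons p rest ih =>
    obtain ⟨k, v⟩ := p
    rw [List.foldl_cons, ih, List.map_cons, List.append_assoc]
    by_cases hm : excl.contains k = true
    · have hk := (PySem.Set.contains_iff _ _).1 hm
      simp [hk]
    · have hk : k ∉ excl := fun h => hm ((PySem.Set.contains_iff _ _).2 h)
      simp [hk]

-- ===== VERDICT (by name: the statement is the Claim_ definition above) =====
theorem sanitize_for_audit_spec : Claim_equal_sanitize_for_audit := by
  intro data ef _dom hpre
  unfold Spec_sanitize_for_audit sanitize_for_audit sanitize_for_audit_alt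
  rw [redact_pass_eq_map, List.nil_append]
  simp only [set_ofList_contains, decide_eq_true_eq]
  by_cases hnil : data.isEmpty
  · rw [if_pos hnil]
    rw [List.isEmpty_iff.mp hnil]
    simp
  · rw [if_neg hnil]
    rw [redact_foldl_items, dict_ofList_items_of_nodup data hpre]
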